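-- pv_equiv track=rewrite | github.com/cc13ny/all-in | talempd/lifered/max_subseq.py | max_subseq_hash
-- ===== SOURCE A (Python) =====
-- def max_subseq_hash(A):
--     cnts = {}
--     for a in A:
--         cnts[a] = cnts.get(a, 0) + 1
--
--     res = 0
--     for a in cnts:
--         nx_cnt = cnts.get(a + 1, 0)
--         res = max(res, cnts[a] + nx_cnt)
--     return res
-- ===== SOURCE B (Python) =====
-- def max_subseq_hash(A):
--     # Sort, then one pass over runs of equal values; a run adjacent to the
--     # previous run (value == prev+1) combines both run lengths.
--     s = sorted(A)
--     res = 0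
--     prev_val = None
--     prev_cnt = 0
--     k = 0
--     n = len(s)
--     while k < n:
--         v = s[k]
--         c = 1
--         while k + 1 < n and s[k + 1] == v:
--             c += 1
--             k += 1
--         k += 1
--         cand = c + (prev_cnt if prev_val is not None and prev_val + 1 == v else 0)
--         if cand > res:
--             res = cand
--         prev_val = v
--         prev_cnt = c
--     return res
-- ===== Notes on version B (the rewrite author's own statement) =====
-- stated objective: alternative
-- what changed: Replaces the hash-counter with dict successor lookups by sorting and a single pass over runs of equal values, combining a run with the previous run when the values are consecutive.
import Mathlib
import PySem

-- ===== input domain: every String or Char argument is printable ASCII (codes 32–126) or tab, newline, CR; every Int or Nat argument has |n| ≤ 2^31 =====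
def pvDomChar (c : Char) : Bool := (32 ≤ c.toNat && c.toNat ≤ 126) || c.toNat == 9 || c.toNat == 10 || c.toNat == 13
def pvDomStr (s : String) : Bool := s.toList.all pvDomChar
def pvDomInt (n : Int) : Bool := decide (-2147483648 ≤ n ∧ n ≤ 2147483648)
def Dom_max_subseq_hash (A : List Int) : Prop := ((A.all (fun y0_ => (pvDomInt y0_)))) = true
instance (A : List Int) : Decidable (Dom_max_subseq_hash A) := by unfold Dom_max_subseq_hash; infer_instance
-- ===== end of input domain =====

-- B replaces A's hash-counter + successor lookups by sort-then-scan over runs of equal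
-- values (alternative decomposition, same results; not claimed faster).

-- ===== PORT A =====
def max_subseq_hash (A : List Int) : Int :=
  let cnts := A.foldl (fun d a => d.insert a (d.getD a 0 + 1)) PySem.Dict.empty
  -- 'cnts[a]' is looked up with a drawn from cnts' own keys, so the Python never
  -- raises KeyError; getD with any default is exact there.
  cnts.keys.foldl (fun res a => max res (cnts.getD a 0 + cnts.getD (a + 1) 0)) 0

-- ===== PORT B =====
-- the run-grouping while-loop of Source B: consume the run of the head value, then recurse
def pvAltLoop : List Int → Option Int → Int → Int → Int
  | [], _, _, res => res
  | v :: t, prev?, prevCnt, res =>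
    let c : Int := 1 + ((t.takeWhile (fun x => x == v)).length : Int)
    let add : Int := match prev? with
      | some p => if p + 1 = v then prevCnt else 0
      | none => 0
    let cand := c + add
    pvAltLoop (t.dropWhile (fun x => x == v)) (some v) c (if cand > res then cand else res)
termination_by s _ _ _ => s.length
decreasing_by
  simpa using Nat.lt_succ_of_le (List.length_dropWhile_le _ _)

def max_subseq_hash_alt (A : List Int) : Int :=
  pvAltLoop (PySem.List.sorted A (fun x => x) false) none 0 0

-- ===== PRECONDITION & SPEC =====
def Spec_max_subseq_hash (A : List Int) (out : Int) : Prop := out = max_subseq_hash_alt A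
instance (A : List Int) (out : Int) : Decidable (Spec_max_subseq_hash A out) := by unfold Spec_max_subseq_hash; infer_instance

-- ===== CLAIM (what is proved, stated in full; the proofs are below) =====
def Claim_equal_max_subseq_hash : Prop := ∀ (A : List Int), Dom_max_subseq_hash A → Spec_max_subseq_hash A (max_subseq_hash A)

-- ===== LEMMAS AND PROOFS =====

-- multiplicity of v in A, as an Int
def pvCnt (A : List Int) (v : Int) : Int := (A.count v : Int)

lemma pvCnt_nonneg (A : List Int) (v : Int) : 0 ≤ pvCnt A v := Int.natCast_nonneg _

lemma pvCnt_eq_zero (A : List Int) (v : Int) (h : v ∉ A) : pvCnt A v = 0 := by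
  simp [pvCnt, List.count_eq_zero.2 h]

-- ---- generic facts about foldl max ----
lemma le_foldl_max (l : List Int) (init : Int) : init ≤ l.foldl max init := by
  induction l generalizing init with
  | nil => simp
  | cons x t ih => exact le_trans (le_max_left _ _) (ih _)

lemma mem_le_foldl_max {l : List Int} {x : Int} (h : x ∈ l) (init : Int) :
    x ≤ l.foldl max init := by
  induction l generalizing init with
  | nil => simp at h
  | cons y t ih =>
    rcases List.mem_cons.1 h with rfl | h
    · exact le_trans (le_max_right _ _) (le_foldl_max _ _)
    · exact ih h _

lemma foldl_max_le {l : List Int} {b init : Int} (hb : init ≤ b)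
    (h : ∀ x ∈ l, x ≤ b) : l.foldl max init ≤ b := by
  induction l generalizing init with
  | nil => simpa
  | cons y t ih =>
    exact ih (max_le hb (h y (by simp))) (fun x hx => h x (by simp [hx]))

-- ---- distinct values of a list, in B's grouping order ----
def pvKeysOf : List Int → List Int
  | [] => []
  | v :: t => v :: pvKeysOf (t.dropWhile (fun x => x == v))
termination_by s => s.length
decreasing_by
  simpa using Nat.lt_succ_of_le (List.length_dropWhile_le _ _)

lemma mem_pvKeysOf (s : List Int) (x : Int) : x ∈ pvKeysOf s ↔ x ∈ s := by
  induction s using pvKeysOf.induct with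
  | case1 => simp [pvKeysOf]
  | case2 v t ih =>
    rw [pvKeysOf]
    constructor
    · rintro h
      rcases List.mem_cons.1 h with rfl | h
      · simp
      · exact List.mem_cons_of_mem _ ((List.dropWhile_sublist _).mem (ih.1 h))
    · intro h
      rcases List.mem_cons.1 h with rfl | h
      · simp
      · by_cases hx : x = v
        · simp [hx]
        · refine List.mem_cons_of_mem _ (ih.2 ?_)
          have := List.takeWhile_append_dropWhile (p := fun y => y == v) (l := t)
          rw [← this] at h
          rcases List.mem_append.1 h with h | h
          · exact absurd (by simpa using List.mem_takeWhile_imp h) hx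
          · exact h

-- in a sorted list headed by v, the dropWhile part contains no v
lemma not_mem_dropWhile_sorted (v : Int) :
    ∀ t : List Int, (∀ x ∈ t, v ≤ x) → t.Pairwise (· ≤ ·) →
      v ∉ t.dropWhile (fun x => x == v) := by
  intro t
  induction t with
  | nil => simp
  | cons a t' ih =>
    intro hle hs
    by_cases ha : a = v
    · subst ha
      rw [List.dropWhile_cons_of_pos (by simp)]
      exact ih (fun x hx => hle x (by simp [hx])) (List.Pairwise.of_cons hs)
    · rw [List.dropWhile_cons_of_neg (by simpa using ha)]
      intro hmem
      rcases List.mem_cons.1 hmem with rfl | hmem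
      · exact ha rfl
      · have h1 : v ≤ a := hle a (by simp)
        have h2 : a ≤ v := List.rel_of_pairwise_cons hs hmem
        exact ha (le_antisymm h2 h1)

-- the main loop invariant for B's run-scan
lemma pvAltLoop_eq (A0 : List Int) :
    ∀ s : List Int, s.Pairwise (· ≤ ·) →
    ∀ (prev? : Option Int) (pc res : Int),
      (∀ u ∈ s, (s.count u : Int) = pvCnt A0 u) →
      (match prev? with
       | none => pc = 0 ∧ (∀ u ∈ A0, u ∈ s)
       | some p => pc = pvCnt A0 p ∧ (∀ x ∈ s, p < x) ∧ (∀ u ∈ A0, u ∈ s ∨ u ≤ p)) →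
      pvAltLoop s prev? pc res =
        ((pvKeysOf s).map (fun v => pvCnt A0 (v - 1) + pvCnt A0 v)).foldl max res := by
  intro s
  induction s using pvKeysOf.induct with
  | case1 => intro _ prev? pc res _ _; simp [pvAltLoop, pvKeysOf]
  | case2 v t ih =>
    intro hs prev? pc res hcount hctx
    have htle : ∀ x ∈ t, v ≤ x := fun x hx => List.rel_of_pairwise_cons hs hx
    have hts : t.Pairwise (· ≤ ·) := List.Pairwise.of_cons hs
    set tw := t.takeWhile (fun x => x == v) with htw
    set dw := t.dropWhile (fun x => x == v) with hdw
    have hsplit : tw ++ dw = t := List.takeWhile_append_dropWhile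
    have hvdw : v ∉ dw := not_mem_dropWhile_sorted v t htle hts
    have hdwt : List.Sublist dw t := hdw ▸ List.dropWhile_sublist _
    have hdwgt : ∀ x ∈ dw, v < x := by
      intro x hx
      have h1 : v ≤ x := htle x (hdwt.mem hx)
      rcases lt_or_eq_of_le h1 with h | h
      · exact h
      · exact absurd (h ▸ hx) hvdw
    have htwall : ∀ x ∈ tw, x = v := by
      intro x hx; simpa using List.mem_takeWhile_imp hx
    -- the run length is the multiplicity of v
    have hcv : (1 + (tw.length : Int)) = pvCnt A0 v := by
      have h1 : tw.count v = tw.length :=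
        List.count_eq_length.2 (fun b hb => ((htwall b hb).symm ▸ rfl))
      have h2 : dw.count v = 0 := List.count_eq_zero.2 hvdw
      have h3 : (v :: t).count v = 1 + tw.length := by
        rw [← hsplit]
        simp [List.count_append, h1, h2, Nat.add_comm]
      have := hcount v (by simp)
      rw [h3] at this
      push_cast at this
      linarith
    -- counts survive into the remainder
    have hcount' : ∀ u ∈ dw, (dw.count u : Int) = pvCnt A0 u := by
      intro u hu
      have hne : u ≠ v := fun h => hvdw (h ▸ hu)
      have h2 : tw.count u = 0 :=
        List.count_eq_zero.2 (fun h => hne (htwall u h))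
      have : (v :: t).count u = dw.count u := by
        rw [← hsplit]
        simp [List.count_append, h2, List.count_cons_of_ne (Ne.symm hne)]
      rw [← this]
      exact hcount u (List.mem_cons_of_mem _ (hdwt.mem hu))
    have hdws : dw.Pairwise (· ≤ ·) := List.Pairwise.sublist hdwt hts
    -- membership in the processed head splits off
    have hkeep : ∀ u, u ∈ (v :: t) → u ∈ dw ∨ u ≤ v := by
      intro u hu
      rcases List.mem_cons.1 hu with rfl | hu
      · exact Or.inr le_rfl
      · rw [← hsplit] at hu
        rcases List.mem_append.1 hu with h | h
        · exact Or.inr (le_of_eq (htwall u h))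
        · exact Or.inl h
    cases prev? with
    | none =>
      obtain ⟨-, hall⟩ := hctx
      have hprev : pvCnt A0 (v - 1) = 0 := by
        apply pvCnt_eq_zero
        intro hmem
        rcases List.mem_cons.1 (hall _ hmem) with h | h
        · omega
        · have := htle _ h; omega
      rw [pvAltLoop.eq_def]
      dsimp only
      rw [ih hdws (some v) (1 + (tw.length : Int)) _ hcount'
        ⟨hcv, hdwgt, fun u hu => hkeep u (hall u hu)⟩]
      rw [pvKeysOf]
      simp only [List.map_cons, List.foldl_cons, ← hdw]
      congr 1
      simp only [← htw, gt_iff_lt, max_def]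
      split_ifs <;> omega
    | some p =>
      obtain ⟨hpc, hlt, hall⟩ := hctx
      have hpv : p < v := hlt v (by simp)
      have hkeepA : ∀ u ∈ A0, u ∈ dw ∨ u ≤ v := by
        intro u hu
        rcases hall u hu with h | h
        · exact hkeep u h
        · exact Or.inr (by omega)
      have hprev : (if p + 1 = v then pc else 0) = pvCnt A0 (v - 1) := by
        by_cases hadj : p + 1 = v
        · have hpe : p = v - 1 := by omega
          rw [if_pos hadj, hpc, hpe]
        · rw [if_neg hadj]
          symm
          apply pvCnt_eq_zero
          intro hmem
          rcases hall _ hmem with h | h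
          · rcases List.mem_cons.1 h with h | h
            · omega
            · have := htle _ h; omega
          · omega
      rw [pvAltLoop.eq_def]
      dsimp only
      rw [ih hdws (some v) (1 + (tw.length : Int)) _ hcount' ⟨hcv, hdwgt, hkeepA⟩]
      rw [pvKeysOf]
      simp only [List.map_cons, List.foldl_cons, ← hdw]
      congr 1
      simp only [← htw, gt_iff_lt, max_def]
      split_ifs at hprev ⊢ <;> omega

-- B's result as a fold of candidates over the distinct values
lemma alt_eq_fold (A : List Int) :
    max_subseq_hash_alt A =
      ((pvKeysOf (PySem.List.sorted A (fun x => x) false)).map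
        (fun v => pvCnt A (v - 1) + pvCnt A v)).foldl max 0 := by
  apply pvAltLoop_eq A
  · exact PySem.List.sorted_pairwise A (fun x => x) 
  · intro u _
    unfold pvCnt
    congr 1
    exact (PySem.List.sorted_perm A (fun x => x) false).count_eq u
  · exact ⟨rfl, fun u hu => (PySem.List.mem_sorted _ _ _ _).2 hu⟩

-- A's result as a fold of candidates over the distinct values
lemma a_eq_fold (A : List Int) :
    max_subseq_hash A =
      ((PySem.Set.ofList A).map
        (fun v => pvCnt A v + pvCnt A (v + 1))).foldl max 0 := by
  show List.foldl
      (fun res a => max res ((PySem.Dict.counter A).getD a 0 + (PySem.Dict.counter A).getD (a + 1) 0)) 0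
      (PySem.Dict.counter A).keys = _
  rw [PySem.Dict.keys_counter, List.foldl_map]
  apply PySem.List.foldl_congr_mem
  intro acc x hx
  simp [PySem.Dict.getD_counter, pvCnt]

-- final: the two folds agree
lemma folds_eq (A : List Int) : max_subseq_hash A = max_subseq_hash_alt A := by
  rw [a_eq_fold, alt_eq_fold]
  set KA := PySem.Set.ofList A with hKA
  set KB := pvKeysOf (PySem.List.sorted A (fun x => x) false) with hKB
  have hmemA : ∀ x, x ∈ KA ↔ x ∈ A := fun x => PySem.Set.mem_ofList _ _
  have hmemB : ∀ x, x ∈ KB ↔ x ∈ A := by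
    intro x
    rw [hKB, mem_pvKeysOf, PySem.List.mem_sorted]
  apply le_antisymm
  · apply foldl_max_le (le_foldl_max _ _)
    intro x hx
    rcases List.mem_map.1 hx with ⟨v, hv, rfl⟩
    by_cases h1 : (v + 1) ∈ A
    · have : pvCnt A v + pvCnt A (v + 1) =
          pvCnt A ((v + 1) - 1) + pvCnt A (v + 1) := by ring_nf
      rw [this]
      exact mem_le_foldl_max (List.mem_map_of_mem ((hmemB _).2 h1)) 0
    · rw [pvCnt_eq_zero A _ h1, add_zero]
      refine le_trans ?_ (mem_le_foldl_max
        (List.mem_map_of_mem ((hmemB v).2 ((hmemA v).1 hv))) 0)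
      have := pvCnt_nonneg A (v - 1)
      omega
  · apply foldl_max_le (le_foldl_max _ _)
    intro x hx
    rcases List.mem_map.1 hx with ⟨v, hv, rfl⟩
    by_cases h1 : (v - 1) ∈ A
    · have : pvCnt A (v - 1) + pvCnt A v =
          pvCnt A (v - 1) + pvCnt A ((v - 1) + 1) := by ring_nf
      rw [this]
      exact mem_le_foldl_max (List.mem_map_of_mem ((hmemA _).2 h1)) 0
    · rw [pvCnt_eq_zero A _ h1, zero_add]
      refine le_trans ?_ (mem_le_foldl_max
        (List.mem_map_of_mem ((hmemA v).2 ((hmemB v).1 hv))) 0)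
      have := pvCnt_nonneg A (v + 1)
      omega

-- ===== VERDICT (by name: the statement is the Claim_ definition above) =====
theorem max_subseq_hash_spec : Claim_equal_max_subseq_hash := by
  intro A _
  exact folds_eq A
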